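-- pv_equiv track=rewrite | github.com/ncsa/swsuite | src/swqueue.py | split_frames
-- ===== SOURCE A (Python) =====
-- def split_frames(m_data):
--     x = []
--     indices = []
--     for i in range(len(m_data)):
--         line = m_data[i]
--         for l in line:
--             if 'JobId' in l:
--                 indices.append(i)
--
--     for i in range(len(indices)):
--         if i+1 < len(indices):
--             indices[i] = (indices[i], indices[i+1])
--     indices[-1] = (indices[-1], len(m_data))
--
--     frames = []
--     for i in indices:
--         frames.append(m_data[i[0]:i[1]])
--
--     return frames
-- ===== SOURCE B (Python) =====
-- def split_frames(m_data):
--     # One forward pass: flush the current frame at every 'JobId' boundary marker.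
--     frames = []
--     current = None  # None = before the first boundary (that prefix is dropped)
--     for line in m_data:
--         for l in line:
--             if 'JobId' in l:
--                 if current is not None:
--                     frames.append(current)
--                 current = []
--         if current is not None:
--             current.append(line)
--     if current is not None:
--         frames.append(current)
--     return frames
-- ===== Notes on version B (the rewrite author's own statement) =====
-- stated objective: simpler
-- what changed: A makes three passes (collect marker indices, pair them up in place, slice the data per pair); B is a single forward pass that flushes the current frame at each 'JobId' marker and drops the prefix before the first marker.
-- outside the precondition, e.g. on split_frames([]): A raises IndexError, B returns []; on split_frames([['x'], []]): A raises IndexError, B returns []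
-- crash fix: On inputs with no element containing 'JobId' anywhere, A raises IndexError (indices[-1] on the empty index list); B returns []. — e.g. on split_frames([["x"], []]): A raises IndexError, B returns []
import Mathlib
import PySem

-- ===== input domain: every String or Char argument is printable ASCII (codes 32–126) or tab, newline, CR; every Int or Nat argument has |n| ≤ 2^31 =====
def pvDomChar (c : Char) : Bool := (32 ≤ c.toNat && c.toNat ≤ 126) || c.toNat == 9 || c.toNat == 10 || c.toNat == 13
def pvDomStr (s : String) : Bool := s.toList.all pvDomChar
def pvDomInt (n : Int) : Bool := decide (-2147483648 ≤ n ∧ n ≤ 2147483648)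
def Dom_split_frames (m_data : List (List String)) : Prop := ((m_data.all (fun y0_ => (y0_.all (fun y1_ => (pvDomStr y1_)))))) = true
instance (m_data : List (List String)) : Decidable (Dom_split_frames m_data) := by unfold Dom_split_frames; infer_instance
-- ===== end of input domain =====

-- B replaces A's three passes (collect indices / pair them in place / slice) by one forward pass
-- that flushes the current frame at every 'JobId' marker (objective: simpler single-pass decomposition).

-- ===== PORT A =====
def hasJob (l : String) : Bool := PySem.Str.isIn "JobId" l

-- 'indices[i] = (indices[i], indices[i+1])' for all i with i+1 < len, then 'indices[-1] = (indices[-1], n)':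
-- pairs each index with its successor, the last with n.  ([] is unreachable under Pre_: Python raises there.)
def pairUp : List Int → Int → List (Int × Int)
  | [], _ => []
  | [a], n => [(a, n)]
  | a :: b :: rest, n => (a, b) :: pairUp (b :: rest) n

def split_frames (m_data : List (List String)) : List (List (List String)) :=
  let indices : List Int :=
    (PySem.List.enumerate m_data).foldl
      (fun acc p => p.2.foldl (fun acc2 l => if hasJob l then acc2 ++ [p.1] else acc2) acc) []
  let pairs := pairUp indices (m_data.length : Int)
  pairs.foldl (fun acc p => acc ++ [PySem.List.slice m_data (some p.1) (some p.2)]) []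

-- ===== PORT B =====
-- state = (frames so far, current frame: none = before the first boundary)
def altFlush (st : List (List (List String)) × Option (List (List String))) : List (List (List String)) :=
  match st.2 with
  | some cur => st.1 ++ [cur]
  | none => st.1

def altStepEl (st : List (List (List String)) × Option (List (List String))) (l : String) :
    List (List (List String)) × Option (List (List String)) :=
  if hasJob l then (altFlush st, some []) else st

def altStepLine (st : List (List (List String)) × Option (List (List String))) (line : List String) :
    List (List (List String)) × Option (List (List String)) :=
  let st1 := line.foldl altStepEl st
  match st1.2 with
  | some cur => (st1.1, some (cur ++ [line]))
  | none => st1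

def split_frames_alt (m_data : List (List String)) : List (List (List String)) :=
  altFlush (m_data.foldl altStepLine ([], none))

-- ===== PRECONDITION & SPEC =====
-- Pre_ excludes exactly the inputs with no 'JobId' marker anywhere: there Python A raises IndexError
-- (indices[-1] on an empty list).
def Pre_split_frames (m_data : List (List String)) : Prop :=
  (m_data.any (fun line => line.any (fun l => PySem.Str.isIn "JobId" l))) = true
instance (m_data : List (List String)) : Decidable (Pre_split_frames m_data) := by
  unfold Pre_split_frames; infer_instance

def pvWitness_split_frames : List (List String) := [["JobId=1"], ["x"]]

-- On inputs with no 'JobId' marker anywhere A raises IndexError; B returns [].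
def Raises_split_frames (m_data : List (List String)) : Prop :=
  (m_data.all (fun line => line.all (fun l => !(PySem.Str.isIn "JobId" l)))) = true
instance (m_data : List (List String)) : Decidable (Raises_split_frames m_data) := by
  unfold Raises_split_frames; infer_instance
def pvRaiseWitness_split_frames : List (List String) := [["x"], []]
def pvRaiseWitnessOut_split_frames : List (List (List String)) := []

def Spec_split_frames (m_data : List (List String)) (out : List (List (List String))) : Prop :=
  out = split_frames_alt m_data
instance (m_data : List (List String)) (out : List (List (List String))) : Decidable (Spec_split_frames m_data out) := by
  unfold Spec_split_frames; infer_instance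

-- ===== CLAIM (what is proved, stated in full; the proofs are below) =====
def Claim_equal_split_frames : Prop := ∀ (m_data : List (List String)), Dom_split_frames m_data → Pre_split_frames m_data → Spec_split_frames m_data (split_frames m_data)
def Claim_raises_split_frames : Prop := (∀ (m_data : List (List String)), Dom_split_frames m_data → Raises_split_frames m_data → ¬ Pre_split_frames m_data) ∧ (Dom_split_frames (pvRaiseWitness_split_frames) ∧ Raises_split_frames (pvRaiseWitness_split_frames) ∧ split_frames_alt (pvRaiseWitness_split_frames) = pvRaiseWitnessOut_split_frames)

-- ===== LEMMAS AND PROOFS =====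

-- number of boundary markers on one line
def cnt (line : List String) : Nat := line.countP hasJob

-- frames produced from the remaining lines when the current frame is `cur`
def gFrames : List (List String) → List (List String) → List (List (List String))
  | [], cur => [cur]
  | line :: rest, cur =>
    if cnt line = 0 then gFrames rest (cur ++ [line])
    else (cur :: List.replicate (cnt line - 1) []) ++ gFrames rest [line]

-- frames produced before the first boundary has been seen
def hFrames : List (List String) → List (List (List String))
  | [] => []
  | line :: rest =>
    if cnt line = 0 then hFrames rest
    else List.replicate (cnt line - 1) [] ++ gFrames rest [line]

-- A's index list, as natural numbers
def JIdx : List (List String) → List Nat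
  | [] => []
  | line :: rest => List.replicate (cnt line) 0 ++ (JIdx rest).map (· + 1)

def pairUpN : List Nat → Nat → List (Nat × Nat)
  | [], _ => []
  | [a], n => [(a, n)]
  | a :: b :: rest, n => (a, b) :: pairUpN (b :: rest) n

def seg (v : List (List String)) (p : Nat × Nat) : List (List String) :=
  (v.drop p.1).take (p.2 - p.1)

theorem inner_fold_eq (line : List String) (i : Int) (acc : List Int) :
    line.foldl (fun acc2 l => if hasJob l then acc2 ++ [i] else acc2) acc
      = acc ++ List.replicate (cnt line) i := by
  rw [PySem.List.foldl_append_if hasJob (fun _ => i)]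
  congr 1
  simp [cnt, List.countP_eq_length_filter]

theorem flatMap_enum (m : List (List String)) (s : Int) :
    (PySem.List.enumerate m s).flatMap (fun p => List.replicate (cnt p.2) p.1)
      = (JIdx m).map (fun (a : Nat) => (a : Int) + s) := by
  induction m generalizing s with
  | nil => simp [PySem.List.enumerate, JIdx]
  | cons line rest ih =>
    rw [PySem.List.enumerate_cons]
    simp only [List.flatMap_cons, JIdx, List.map_append, List.map_map]
    congr 1
    · simp [List.map_replicate]
    · rw [ih (s+1)]
      apply List.map_congr_left; intro a _; simp; ring

theorem indices_eq (m : List (List String)) :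
    (PySem.List.enumerate m).foldl
      (fun acc p => p.2.foldl (fun acc2 l => if hasJob l then acc2 ++ [p.1] else acc2) acc) []
      = (JIdx m).map (fun (a : Nat) => (a : Int)) := by
  rw [PySem.List.foldl_congr_mem _ _ (fun acc p => acc ++ List.replicate (cnt p.2) p.1) _
        (fun acc p _ => inner_fold_eq p.2 p.1 acc),
      PySem.List.foldl_append_eq_flatMap, flatMap_enum m 0]
  simp

theorem pairUp_cast (l : List Nat) (n : Nat) :
    pairUp (l.map (fun (a : Nat) => (a : Int))) (n : Int)
      = (pairUpN l n).map (fun p => ((p.1 : Int), (p.2 : Int))) := by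
  induction l, n using pairUpN.induct with
  | case1 n => rfl
  | case2 a n => rfl
  | case3 a b rest n ih => simpa [pairUp, pairUpN] using ih

theorem pairUpN_shift (l : List Nat) (n c : Nat) :
    pairUpN (l.map (· + c)) (c + n) = (pairUpN l n).map (fun p => (p.1 + c, p.2 + c)) := by
  induction l, n using pairUpN.induct with
  | case1 n => rfl
  | case2 a n => simp [pairUpN, Nat.add_comm]
  | case3 a b rest n ih => simpa [pairUp, pairUpN] using ih

theorem pairUpN_replicate (j : Nat) (a : Nat) (t : List Nat) (n : Nat) :
    pairUpN (List.replicate j a ++ a :: t) n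
      = List.replicate j (a, a) ++ pairUpN (a :: t) n := by
  induction j with
  | zero => rfl
  | succ j ih =>
    cases j with
    | zero => simp [pairUpN]
    | succ j' => simpa [List.replicate_succ, pairUpN] using ih

theorem seg_shift (v : List (List String)) (c : Nat) (p : Nat × Nat) :
    seg v (p.1 + c, p.2 + c) = seg (v.drop c) p := by
  show (v.drop (p.1 + c)).take (p.2 + c - (p.1 + c)) = ((v.drop c).drop p.1).take (p.2 - p.1)
  rw [List.drop_drop, Nat.add_comm c p.1]
  congr 1
  omega

theorem rep_cons {α : Type} (k : Nat) (a : α) (t : List α) :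
    List.replicate k a ++ a :: t = a :: (List.replicate k a ++ t) := by
  induction k with
  | zero => rfl
  | succ k ih => simp [List.replicate_succ, ih]

theorem L2 (rest : List (List String)) : ∀ (cur : List (List String)),
    (pairUpN (0 :: (JIdx rest).map (· + cur.length)) (cur.length + rest.length)).map
        (fun p => seg (cur ++ rest) p)
      = gFrames rest cur := by
  induction rest with
  | nil =>
    intro cur
    simp [JIdx, pairUpN, gFrames, seg]
  | cons line rest' ih =>
    intro cur
    by_cases h0 : cnt line = 0
    · have hmap : (JIdx (line :: rest')).map (· + cur.length)
          = (JIdx rest').map (· + (cur ++ [line]).length) := by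
        simp only [JIdx, h0, List.replicate_zero, List.nil_append, List.map_map]
        apply List.map_congr_left; intro a _; simp; omega
      have hlen : cur.length + (line :: rest').length = (cur ++ [line]).length + rest'.length := by
        simp; omega
      have happ : cur ++ line :: rest' = (cur ++ [line]) ++ rest' := by simp
      rw [hmap, hlen, happ, ih (cur ++ [line])]
      simp [gFrames, h0]
    · obtain ⟨k, hk⟩ := Nat.exists_eq_succ_of_ne_zero h0
      have hlist : ((JIdx (line :: rest')).map (· + cur.length))
          = cur.length :: (List.replicate k cur.length
              ++ (JIdx rest').map (fun a => a + 1 + cur.length)) := by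
        simp [JIdx, hk, List.replicate_succ, List.map_map]
        intro a _; omega
      have hn : cur.length + (line :: rest').length = cur.length + (1 + rest'.length) := by
        simp; omega
      have hcm : cur.length :: (JIdx rest').map (fun a => a + 1 + cur.length)
          = (0 :: (JIdx rest').map (· + 1)).map (· + cur.length) := by
        simp [List.map_map]
        intro a _; omega
      rw [hlist, hn]
      show ((0, cur.length) :: pairUpN (cur.length :: (List.replicate k cur.length
              ++ (JIdx rest').map (fun a => a + 1 + cur.length))) (cur.length + (1 + rest'.length))).map
          (fun p => seg (cur ++ line :: rest') p) = _
      rw [← rep_cons, pairUpN_replicate, hcm, pairUpN_shift]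
      have h1 : seg (cur ++ line :: rest') (0, cur.length) = cur := by
        simp [seg]
      have h3 : ∀ p, seg (cur ++ line :: rest') (p.1 + cur.length, p.2 + cur.length)
          = seg (line :: rest') p := by
        intro p
        rw [seg_shift]
        congr 1
        exact List.drop_left
      have hih := ih [line]
      simp only [List.length_singleton, List.singleton_append] at hih
      simp only [List.map_cons, List.map_append, List.map_replicate, List.map_map, h1]
      have h2 : seg (cur ++ line :: rest') (cur.length, cur.length) = [] := by
        simp [seg]
      rw [h2]
      have h4 : List.map ((fun p => seg (cur ++ line :: rest') p)
            ∘ fun p => (p.1 + cur.length, p.2 + cur.length))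
          (pairUpN (0 :: List.map (fun x => x + 1) (JIdx rest')) (1 + rest'.length))
          = List.map (fun p => seg (line :: rest') p)
          (pairUpN (0 :: List.map (fun x => x + 1) (JIdx rest')) (1 + rest'.length)) :=
        List.map_congr_left (fun p _ => h3 p)
      rw [h4, hih]
      simp [gFrames, hk]

theorem L1 (m : List (List String)) :
    (pairUpN (JIdx m) m.length).map (fun p => seg m p) = hFrames m := by
  induction m with
  | nil => rfl
  | cons line rest ih =>
    by_cases h0 : cnt line = 0
    · have hmap : JIdx (line :: rest) = (JIdx rest).map (· + 1) := by
        simp [JIdx, h0]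
      have hn : (line :: rest).length = 1 + rest.length := by simp; omega
      rw [hmap, hn, pairUpN_shift]
      have h3 : ∀ p, seg (line :: rest) (p.1 + 1, p.2 + 1) = seg rest p := by
        intro p; rw [seg_shift]; rfl
      have h4 : List.map ((fun p => seg (line :: rest) p) ∘ fun p => (p.1 + 1, p.2 + 1))
            (pairUpN (JIdx rest) rest.length)
          = List.map (fun p => seg rest p) (pairUpN (JIdx rest) rest.length) :=
        List.map_congr_left (fun p _ => h3 p)
      rw [List.map_map, h4, ih]
      simp [hFrames, h0]
    · obtain ⟨k, hk⟩ := Nat.exists_eq_succ_of_ne_zero h0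
      have hmap : JIdx (line :: rest) = List.replicate k 0 ++ 0 :: (JIdx rest).map (· + 1) := by
        simp [JIdx, hk, List.replicate_succ]
        rw [rep_cons]
      have hn : (line :: rest).length = 1 + rest.length := by simp; omega
      rw [hmap, hn, pairUpN_replicate]
      have hih := L2 rest [line]
      simp only [List.length_singleton, List.singleton_append] at hih
      simp only [List.map_append, List.map_replicate]
      have h2 : seg (line :: rest) (0, 0) = [] := by simp [seg]
      rw [h2, hih]
      simp [hFrames, hk]

theorem A_eq_h (m : List (List String)) : split_frames m = hFrames m := by
  show (pairUp ((PySem.List.enumerate m).foldl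
      (fun acc p => p.2.foldl (fun acc2 l => if hasJob l then acc2 ++ [p.1] else acc2) acc) [])
      (m.length : Int)).foldl
      (fun acc p => acc ++ [PySem.List.slice m (some p.1) (some p.2)]) [] = hFrames m
  rw [indices_eq, pairUp_cast,
    PySem.List.foldl_append_singleton_eq_map,
    List.nil_append, List.map_map]
  rw [← L1 m]
  apply List.map_congr_left
  intro p _
  simp [PySem.List.slice_natCast, seg]

theorem innerSome (line : List String) : ∀ (F : List (List (List String))) (cur : List (List String)),
    line.foldl altStepEl (F, some cur)
      = if cnt line = 0 then (F, some cur)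
        else (F ++ cur :: List.replicate (cnt line - 1) [], some ([] : List (List String))) := by
  induction line with
  | nil => intro F cur; simp [cnt]
  | cons l t ih =>
    intro F cur
    by_cases hl : hasJob l
    · have hc : cnt (l :: t) = cnt t + 1 := by simp [cnt, hl]
      simp only [List.foldl_cons, altStepEl, hl, if_true, altFlush, ih]
      by_cases h0 : cnt t = 0
      · simp [hc, h0]
      · obtain ⟨j, hj⟩ := Nat.exists_eq_succ_of_ne_zero h0
        simp [hc, hj, List.replicate_succ]
    · have hc : cnt (l :: t) = cnt t := by simp [cnt, hl]
      simp only [List.foldl_cons, altStepEl, hl]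
      simp only [Bool.false_eq_true, if_false, ih, hc]

theorem innerNone (line : List String) (F : List (List (List String))) :
    line.foldl altStepEl (F, none)
      = if cnt line = 0 then ((F, none) : List (List (List String)) × Option (List (List String)))
        else (F ++ List.replicate (cnt line - 1) [], some ([] : List (List String))) := by
  induction line with
  | nil => simp [cnt]
  | cons l t ih =>
    by_cases hl : hasJob l
    · have hc : cnt (l :: t) = cnt t + 1 := by simp [cnt, hl]
      simp only [List.foldl_cons, altStepEl, hl, if_true, altFlush, innerSome]
      by_cases h0 : cnt t = 0
      · simp [hc, h0]
      · obtain ⟨j, hj⟩ := Nat.exists_eq_succ_of_ne_zero h0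
        simp [hc, hj, List.replicate_succ]
    · have hc : cnt (l :: t) = cnt t := by simp [cnt, hl]
      simp only [List.foldl_cons, altStepEl, hl]
      simp only [Bool.false_eq_true, if_false, ih, hc]

theorem Bsome (m : List (List String)) : ∀ (F : List (List (List String))) (cur : List (List String)),
    altFlush (m.foldl altStepLine (F, some cur)) = F ++ gFrames m cur := by
  induction m with
  | nil => intro F cur; simp [altFlush, gFrames]
  | cons line rest ih =>
    intro F cur
    by_cases h0 : cnt line = 0
    · simp only [List.foldl_cons, altStepLine, innerSome, h0, if_true, ih, gFrames]
    · simp only [List.foldl_cons, altStepLine, innerSome, h0, if_false, ih, gFrames]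
      simp

theorem Bnone (m : List (List String)) (F : List (List (List String))) :
    altFlush (m.foldl altStepLine (F, none)) = F ++ hFrames m := by
  induction m generalizing F with
  | nil => simp [altFlush, hFrames]
  | cons line rest ih =>
    by_cases h0 : cnt line = 0
    · simp only [List.foldl_cons, altStepLine, innerNone, h0, if_true, ih, hFrames]
    · simp only [List.foldl_cons, altStepLine, innerNone, h0, if_false, Bsome, hFrames]
      simp

theorem B_eq_h (m : List (List String)) : split_frames_alt m = hFrames m := by
  show altFlush (m.foldl altStepLine ([], none)) = hFrames m
  rw [Bnone, List.nil_append]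

-- ===== VERDICT (by name: the statement is the Claim_ definition above) =====
theorem split_frames_spec : Claim_equal_split_frames := by
  intro m _ _
  show split_frames m = split_frames_alt m
  rw [A_eq_h, B_eq_h]

@[simp]
theorem split_frames_raises : Claim_raises_split_frames := by
  unfold Claim_raises_split_frames
  constructor
  · intro m _ hr hp
    simp only [Pre_split_frames, List.any_eq_true] at hp
    simp only [Raises_split_frames, List.all_eq_true] at hr
    obtain ⟨line, hline, l, hlmem, hl⟩ := hp
    have h := hr line hline l hlmem
    rw [Bool.not_eq_true'] at h
    rw [hl] at h
    simp at h
  · exact ⟨by decide, by decide, by decide⟩
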